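-- pv_equiv track=rewrite | github.com/AnaVasconcelos52/SENAI-Python-Analise-de-Dados-Bigdata | Aulas Ana/AULA 05/38 - MATH_MODA_V1.py | EncontraModa
-- ===== SOURCE A (Python) =====
-- def EncontraModa (lista1,lista2):
--     valorInicial = lista2[0]
--     indicoModa = 0
--     count = 0
--
--     for n in lista2:
--         if(valorInicial <= n):
--             valorInicial = n
--             indicoModa = count
--
--
--         count +=1
--
--     return lista1[indicoModa]
-- ===== SOURCE B (Python) =====
-- def EncontraModa(lista1, lista2):
--     m = max(lista2)
--     idx = len(lista2) - 1 - lista2[::-1].index(m)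
--     return lista1[idx]
-- ===== Notes on version B (the rewrite author's own statement) =====
-- stated objective: simpler
-- what changed: B replaces the fused running-max scan with manual index/count bookkeeping by a max-then-search decomposition: compute max(lista2) once, then locate its last occurrence via a reverse index search.
import Mathlib
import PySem

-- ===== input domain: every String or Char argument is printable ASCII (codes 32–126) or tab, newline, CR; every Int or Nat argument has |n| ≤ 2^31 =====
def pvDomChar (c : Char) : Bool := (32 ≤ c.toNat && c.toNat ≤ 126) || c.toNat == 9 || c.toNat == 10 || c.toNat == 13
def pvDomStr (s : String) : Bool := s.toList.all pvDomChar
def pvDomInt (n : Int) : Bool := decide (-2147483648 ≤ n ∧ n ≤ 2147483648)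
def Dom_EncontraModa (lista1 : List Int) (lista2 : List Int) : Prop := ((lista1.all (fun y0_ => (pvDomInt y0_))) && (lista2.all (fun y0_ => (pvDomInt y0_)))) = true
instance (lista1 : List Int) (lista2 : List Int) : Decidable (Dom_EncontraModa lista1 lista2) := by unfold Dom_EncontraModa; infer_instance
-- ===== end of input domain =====

-- B replaces A's fused running-max scan (manual index/count bookkeeping) by a
-- max-then-search decomposition: compute max(lista2) once, then find its last
-- occurrence with a reverse index search; same cost, simpler.


-- ===== PORT A =====
-- loop body of A: state = (valorInicial, indicoModa, count)
def stepA (s : Int × Int × Int) (n : Int) : Int × Int × Int :=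
  if s.1 ≤ n then (n, s.2.2, s.2.2 + 1) else (s.1, s.2.1, s.2.2 + 1)

def EncontraModa (lista1 : List Int) (lista2 : List Int) : Int :=
  match PySem.List.pyGet? lista2 0 with
  | none => 0  -- lista2[0] raises IndexError on empty lista2: excluded by Pre_
  | some v0 =>
    let st := lista2.foldl stepA (v0, 0, 0)
    (PySem.List.pyGet? lista1 st.2.1).getD 0  -- out-of-range raises: excluded by Pre_

-- ===== PORT B =====
def EncontraModa_alt (lista1 : List Int) (lista2 : List Int) : Int :=
  match PySem.List.max? lista2 (fun y => y) with
  | none => 0  -- max([]) raises ValueError: excluded by Pre_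
  | some m =>
    match PySem.List.index? lista2.reverse m with
    | none => 0  -- unreachable: the max is a member
    | some r => (PySem.List.pyGet? lista1 ((lista2.length : Int) - 1 - (r : Int))).getD 0

-- ===== PRECONDITION & SPEC =====
-- Pre_ = exactly the inputs where A returns normally: lista2 nonempty and the
-- index of the LAST maximal element of lista2 is a valid index into lista1.
def Pre_EncontraModa (lista1 : List Int) (lista2 : List Int) : Prop :=
  ∃ i ∈ List.range lista2.length, i < lista1.length ∧
    ∀ j ∈ List.range lista2.length,
      lista2.getD j 0 ≤ lista2.getD i 0 ∧ (i < j → lista2.getD j 0 < lista2.getD i 0)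
instance (lista1 : List Int) (lista2 : List Int) : Decidable (Pre_EncontraModa lista1 lista2) := by
  unfold Pre_EncontraModa; infer_instance

def pvWitness_EncontraModa : List Int × List Int := ([5, 6, 7], [1, 3, 2])

def Spec_EncontraModa (lista1 : List Int) (lista2 : List Int) (out : Int) : Prop := out = EncontraModa_alt lista1 lista2
instance (lista1 : List Int) (lista2 : List Int) (out : Int) : Decidable (Spec_EncontraModa lista1 lista2 out) := by unfold Spec_EncontraModa; infer_instance

-- ===== CLAIM (what is proved, stated in full; the proofs are below) =====
def Claim_equal_EncontraModa : Prop := ∀ (lista1 : List Int) (lista2 : List Int), Dom_EncontraModa lista1 lista2 → Pre_EncontraModa lista1 lista2 → Spec_EncontraModa lista1 lista2 (EncontraModa lista1 lista2)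

-- ===== LEMMAS AND PROOFS =====

-- Characterisation of A's loop: the final running max is foldl max, the final
-- recorded index is (offset by the initial count c) the last position where the
-- max occurs, i.e. length - 1 - (position of the max in the reversed list).
theorem foldl_stepA (l : List Int) (v i c : Int) :
    l.foldl stepA (v, i, c) =
      (l.foldl max v,
       (PySem.List.index? l.reverse (l.foldl max v)).elim i
         (fun r => c + ((l.length : Int) - 1 - (r : Int))),
       c + (l.length : Int)) := by
  induction l using List.reverseRecOn with
  | nil => simp [PySem.List.index?_eq_idxOf?]
  | append_singleton l x ih =>
    rw [List.foldl_append, List.foldl_append, ih]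
    simp only [List.foldl_cons, List.foldl_nil, stepA, List.reverse_append,
      List.reverse_cons, List.reverse_nil, List.nil_append, List.singleton_append]
    by_cases hx : List.foldl max v l ≤ x
    · rw [if_pos hx, max_eq_right hx, PySem.List.index?_cons_self]
      simp only [Option.elim_some, Prod.mk.injEq, List.length_append, List.length_cons,
        List.length_nil, true_and]
      push_cast; omega
    · have hx' : x < List.foldl max v l := lt_of_not_ge hx
      rw [if_neg hx, max_eq_left hx'.le, PySem.List.index?_cons_of_ne _ hx'.ne]
      rcases h : PySem.List.index? l.reverse (List.foldl max v l) with _ | r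
      · simp only [Option.map_none, Option.elim_none, Prod.mk.injEq,
          List.length_append, List.length_cons, List.length_nil, true_and]
        push_cast; omega
      · simp only [Option.map_some, Option.elim_some, Prod.mk.injEq,
          List.length_append, List.length_cons, List.length_nil, true_and]
        push_cast; omega

-- ===== VERDICT (by name: the statement is the Claim_ definition above) =====
theorem EncontraModa_spec : Claim_equal_EncontraModa := by
  intro l1 l2 _ hpre
  unfold Spec_EncontraModa
  obtain ⟨i, hi, _⟩ := hpre
  match l2 with
  | [] => simp at hi
  | h :: t =>
    have hmax : PySem.List.max? (h :: t) (fun y => y) = some (t.foldl max h) :=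
      PySem.List.max?_id_cons h t
    have hmem : t.foldl max h ∈ h :: t := PySem.List.max?_mem hmax
    have hmemr : t.foldl max h ∈ (h :: t).reverse := List.mem_reverse.mpr hmem
    have hsome : (PySem.List.index? (h :: t).reverse (t.foldl max h)).isSome :=
      (PySem.List.index?_isSome_iff _ _).mpr hmemr
    obtain ⟨r, hr⟩ := Option.isSome_iff_exists.mp hsome
    have hfold : (h :: t).foldl max h = t.foldl max h := by
      simp [List.foldl]
    have h0 : PySem.List.pyGet? (h :: t) (0 : Int) = some h := by
      simp [PySem.List.pyGet?, PySem.List.pyIdx?]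
    have hA : EncontraModa l1 (h :: t) =
        (PySem.List.pyGet? l1 (0 + (((h :: t).length : Int) - 1 - (r : Int)))).getD 0 := by
      simp only [EncontraModa, h0, foldl_stepA, hfold, hr, Option.elim_some]
    have hB : EncontraModa_alt l1 (h :: t) =
        (PySem.List.pyGet? l1 (((h :: t).length : Int) - 1 - (r : Int))).getD 0 := by
      simp only [EncontraModa_alt, hmax, hr]
    rw [hA, hB, zero_add]
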